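-- pv_equiv track=rewrite | github.com/xuyanlong-gub/insulator_bot_0917 | pipeline/postprocess.py | convert_flags_to_runs
-- ===== SOURCE A (Python) =====
-- from typing import List, Tuple
--
-- def convert_flags_to_runs(flags: List[int]) -> List[Tuple[int, int, int]]:
--     """
--     将 flags 转为索引段：[(flag, i_start, i_end)]，闭区间。
--     """
--     if not flags:
--         return []
--     runs: List[Tuple[int, int, int]] = []
--     curr_flag = flags[0]
--     i_start = 0
--     for i in range(1, len(flags)):
--         if flags[i] != curr_flag:
--             runs.append((curr_flag, i_start, i-1))
--             curr_flag = flags[i]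
--             i_start = i
--     runs.append((curr_flag, i_start, len(flags)-1))
--     return runs
-- ===== SOURCE B (Python) =====
-- from typing import List, Tuple
--
-- def convert_flags_to_runs(flags: List[int]) -> List[Tuple[int, int, int]]:
--     """Two-pointer scan: for each run start i, advance j to the end of the run and
--     emit (flag, i, j-1) directly; no current-flag accumulator and no final flush."""
--     n = len(flags)
--     runs: List[Tuple[int, int, int]] = []
--     i = 0
--     while i < n:
--         f = flags[i]
--         j = i + 1
--         while j < n and flags[j] == f:
--             j += 1
--         runs.append((f, i, j - 1))
--         i = j
--     return runs
-- ===== Notes on version B (the rewrite author's own statement) =====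
-- stated objective: alternative
-- what changed: Replaced A's single accumulator loop (tracking curr_flag/i_start, appending at change points plus a final flush after the loop) by a two-pointer scan that, for each run start i, advances a second pointer j to the run's end in an inner loop and emits the run directly, with no carried run state and no trailing-run special case.
import Mathlib
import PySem

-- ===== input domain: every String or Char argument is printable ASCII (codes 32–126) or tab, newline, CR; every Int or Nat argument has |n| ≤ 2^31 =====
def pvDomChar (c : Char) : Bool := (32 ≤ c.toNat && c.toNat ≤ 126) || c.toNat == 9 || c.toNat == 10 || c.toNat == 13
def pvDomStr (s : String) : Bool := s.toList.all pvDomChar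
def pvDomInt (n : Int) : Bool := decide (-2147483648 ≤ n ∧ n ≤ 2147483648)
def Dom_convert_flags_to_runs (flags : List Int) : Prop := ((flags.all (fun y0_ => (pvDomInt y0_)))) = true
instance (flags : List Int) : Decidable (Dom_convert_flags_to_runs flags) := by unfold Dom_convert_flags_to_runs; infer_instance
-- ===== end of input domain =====

-- B replaces A's accumulator loop (curr_flag/i_start + final flush) by a two-pointer scan emitting each run directly (alternative decomposition, same cost).

-- ===== PORT A =====
-- loop body of A's for-loop: state = (runs, curr_flag, i_start)
def pvStepA (flags : List Int) (s : List (Int × Int × Int) × Int × Int) (i : Int) :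
    List (Int × Int × Int) × Int × Int :=
  if PySem.List.pyGetD flags i 0 ≠ s.2.1 then
    (s.1 ++ [(s.2.1, s.2.2, i - 1)], PySem.List.pyGetD flags i 0, i)
  else s

def convert_flags_to_runs (flags : List Int) : List (Int × Int × Int) :=
  match flags with
  | [] => []
  | _ :: _ =>
    let st := (PySem.List.pyRange 1 (PySem.List.len flags)).foldl (pvStepA flags)
        ([], PySem.List.pyGetD flags 0 0, 0)
    st.1 ++ [(st.2.1, st.2.2, PySem.List.len flags - 1)]

-- ===== PORT B =====
-- Source B's inner while loop: advance j while j < n and flags[j] == f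
def pvInner (flags : List Int) (n : Nat) (f : Int) (j : Nat) : Nat :=
  if j < n ∧ flags.getD j 0 = f then pvInner flags n f (j + 1) else j
termination_by n - j
decreasing_by omega

-- termination bound cited by pvOuter's decreasing_by (the port needs it)
theorem pvInner_ge (flags : List Int) (n : Nat) (f : Int) (j : Nat) :
    j ≤ pvInner flags n f j := by
  unfold pvInner
  split
  · have := pvInner_ge flags n f (j + 1)
    omega
  · omega
termination_by n - j
decreasing_by omega

-- Source B's outer while loop: runs is the accumulated output, i the current run start
def pvOuter (flags : List Int) (n : Nat) (i : Nat) (runs : List (Int × Int × Int)) :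
    List (Int × Int × Int) :=
  if h : i < n then
    let f := flags.getD i 0
    let j := pvInner flags n f (i + 1)
    pvOuter flags n j (runs ++ [(f, (i : Int), (j : Int) - 1)])
  else runs
termination_by n - i
decreasing_by
  have := pvInner_ge flags n (flags.getD i 0) (i + 1)
  omega

def convert_flags_to_runs_alt (flags : List Int) : List (Int × Int × Int) :=
  pvOuter flags flags.length 0 []

-- ===== PRECONDITION & SPEC =====
def Spec_convert_flags_to_runs (flags : List Int) (out : List (Int × Int × Int)) : Prop := out = convert_flags_to_runs_alt flags
instance (flags : List Int) (out : List (Int × Int × Int)) : Decidable (Spec_convert_flags_to_runs flags out) := by unfold Spec_convert_flags_to_runs; infer_instance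

-- ===== CLAIM (what is proved, stated in full; the proofs are below) =====
def Claim_equal_convert_flags_to_runs : Prop := ∀ (flags : List Int), Dom_convert_flags_to_runs flags → Spec_convert_flags_to_runs flags (convert_flags_to_runs flags)

-- ===== LEMMAS AND PROOFS =====

-- bridge between the two loops: runs of a list, built run by run
def pvCount (f : Int) : List Int → Nat
  | [] => 0
  | x :: xs => if x = f then pvCount f xs + 1 else 0

def pvGo : List Int → Int → List (Int × Int × Int)
  | [], _ => []
  | f :: rest, start =>
    let m := pvCount f rest
    let k : Int := (m : Int) + 1
    (f, start, start + k - 1) :: pvGo (rest.drop m) (start + k)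
termination_by xs _ => xs.length
decreasing_by simp

theorem pvGo_cons (f : Int) (rest : List Int) (start : Int) :
    pvGo (f :: rest) start =
      (f, start, start + ((pvCount f rest : Int) + 1) - 1) ::
        pvGo (rest.drop (pvCount f rest)) (start + ((pvCount f rest : Int) + 1)) := by
  simp only [pvGo]

theorem pvCount_append_all (c : Int) (mid l : List Int) (h : ∀ y ∈ mid, y = c) :
    pvCount c (mid ++ l) = mid.length + pvCount c l := by
  induction mid with
  | nil => simp
  | cons x xs ih =>
    simp only [List.mem_cons, forall_eq_or_imp] at h
    simp [pvCount, h.1, ih h.2]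
    omega

-- ===== A-side: the loop invariant, phrased via pvFinish =====
def pvFinish (flags : List Int) (init : List (Int × Int × Int) × Int × Int) (a : Int) :
    List (Int × Int × Int) :=
  let st := (PySem.List.pyRange a (PySem.List.len flags)).foldl (pvStepA flags) init
  st.1 ++ [(st.2.1, st.2.2, PySem.List.len flags - 1)]

theorem pvFinish_step (flags : List Int) (init : List (Int × Int × Int) × Int × Int) (a : Int)
    (h : a < PySem.List.len flags) :
    pvFinish flags init a = pvFinish flags (pvStepA flags init a) (a + 1) := by
  unfold pvFinish
  rw [PySem.List.pyRange_one_cons h, List.foldl_cons]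

theorem pvFinish_last (flags : List Int) (init : List (Int × Int × Int) × Int × Int) (a : Int)
    (h : PySem.List.len flags = a) :
    pvFinish flags init a = init.1 ++ [(init.2.1, init.2.2, PySem.List.len flags - 1)] := by
  subst h; simp [pvFinish, PySem.List.pyRange]

theorem getD_of_drop (l : List Int) (n : Nat) (x : Int) (t : List Int) (h : l.drop n = x :: t) :
    l.getD n 0 = x := by
  have h0 : (l.drop n)[0]?.getD 0 = x := by rw [h]; rfl
  rw [List.getElem?_drop] at h0
  rw [List.getD_eq_getElem?_getD]
  simpa using h0

-- the invariant of A's loop: from index s+1+|mid| on, with current run value curr started at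
-- index s, the elements at indices s..s+|mid| all being curr
theorem keyA (flags : List Int) :
    ∀ (rest mid : List Int) (runs : List (Int × Int × Int)) (curr : Int) (s : Nat),
    (∀ y ∈ mid, y = curr) →
    flags.drop s = curr :: (mid ++ rest) →
    pvFinish flags (runs, curr, (s : Int)) ((s : Int) + 1 + mid.length)
      = runs ++ pvGo (flags.drop s) (s : Int) := by
  intro rest
  induction rest with
  | nil =>
    intro mid runs curr s hmid hdrop
    have hlen : flags.length = s + 1 + mid.length := by
      have := congrArg List.length hdrop
      simp [List.length_drop] at this
      omega
    have hcnt : pvCount curr mid = mid.length := by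
      have := pvCount_append_all curr mid [] hmid
      simpa [pvCount] using this
    rw [pvFinish_last flags _ _ (by simp only [PySem.List.len, hlen]; push_cast; ring)]
    rw [hdrop, List.append_nil, pvGo_cons, hcnt]
    have h3 : PySem.List.len flags - 1 = (s : Int) + ((mid.length : Int) + 1) - 1 := by
      simp only [PySem.List.len, hlen]; push_cast; ring
    rw [h3]
    simp [List.drop_length, pvGo]
  | cons x rest' ih =>
    intro mid runs curr s hmid hdrop
    have hdropa : flags.drop (s + 1 + mid.length) = x :: rest' := by
      have h1 : flags.drop (s + (1 + mid.length)) = x :: rest' := by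
        rw [← List.drop_drop, hdrop]
        rw [show 1 + mid.length = mid.length + 1 from by omega]
        rw [List.drop_succ_cons]
        exact List.drop_left
      simpa [Nat.add_assoc] using h1
    have hx : flags.getD (s + 1 + mid.length) 0 = x := getD_of_drop _ _ _ _ hdropa
    have hlen : flags.length = s + 1 + mid.length + 1 + rest'.length := by
      have := congrArg List.length hdrop
      simp [List.length_drop] at this
      omega
    have hlt : (s : Int) + 1 + mid.length < PySem.List.len flags := by
      simp [PySem.List.len, hlen]; omega
    have hg : PySem.List.pyGetD flags ((s : Int) + 1 + (mid.length : Int)) 0 = x := by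
      rw [show (s : Int) + 1 + (mid.length : Int) = ((s + 1 + mid.length : Nat) : Int) from by
        push_cast; ring]
      rw [PySem.List.pyGetD_natCast]; exact hx
    rw [pvFinish_step flags _ _ hlt]
    by_cases hxc : x = curr
    · have hstep : pvStepA flags (runs, curr, (s : Int)) ((s : Int) + 1 + (mid.length : Int))
          = (runs, curr, (s : Int)) := by
        simp [pvStepA, hg, hxc]
      rw [hstep]
      have hmid' : ∀ y ∈ mid ++ [x], y = curr := by
        intro y hy; rcases List.mem_append.mp hy with h | h
        · exact hmid y h
        · simpa using hxc ▸ (List.mem_singleton.mp h)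
      have hdrop' : flags.drop s = curr :: ((mid ++ [x]) ++ rest') := by
        simpa [List.append_assoc] using hdrop
      have := ih (mid ++ [x]) runs curr s hmid' hdrop'
      rw [show (s : Int) + 1 + (mid.length : Int) + 1
          = (s : Int) + 1 + (((mid ++ [x]).length : Nat) : Int) from by simp; ring]
      exact this
    · have hstep : pvStepA flags (runs, curr, (s : Int)) ((s : Int) + 1 + (mid.length : Int))
          = (runs ++ [(curr, (s : Int), (s : Int) + 1 + (mid.length : Int) - 1)], x,
             (s : Int) + 1 + (mid.length : Int)) := by
        simp [pvStepA, hg, hxc]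
      rw [hstep]
      have hih := ih [] (runs ++ [(curr, (s : Int), (s : Int) + 1 + (mid.length : Int) - 1)]) x
        (s + 1 + mid.length) (by simp) (by simpa using hdropa)
      push_cast [List.length_nil] at hih
      rw [add_zero] at hih
      rw [hih, hdropa]
      have hc : pvCount curr (mid ++ x :: rest') = mid.length := by
        rw [pvCount_append_all curr mid _ hmid]
        simp [pvCount, hxc]
      rw [hdrop, pvGo_cons curr (mid ++ x :: rest') (s : Int), hc, List.drop_left]
      rw [show ((s : Int) + 1 + (mid.length : Int)) = (s : Int) + ((mid.length : Int) + 1) from by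
        ring]
      simp [List.append_assoc]

-- ===== B-side: the two-pointer loops compute pvGo =====
theorem drop_eq_cons_of_lt (l : List Int) (j : Nat) (h : j < l.length) :
    l.drop j = l.getD j 0 :: l.drop (j + 1) := by
  rw [List.drop_eq_getElem_cons h, List.getD_eq_getElem?_getD, List.getElem?_eq_getElem h]
  rfl

theorem pvInner_count (flags : List Int) (f : Int) (j : Nat) :
    pvInner flags flags.length f j = j + pvCount f (flags.drop j) := by
  unfold pvInner
  split
  · rename_i h
    rw [drop_eq_cons_of_lt flags j h.1, h.2]
    have hcnt : pvCount f (f :: flags.drop (j + 1)) = pvCount f (flags.drop (j + 1)) + 1 := by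
      simp [pvCount]
    have ih := pvInner_count flags f (j + 1)
    omega
  · rename_i h
    by_cases hj : j < flags.length
    · have hne : flags.getD j 0 ≠ f := fun hc => h ⟨hj, hc⟩
      rw [drop_eq_cons_of_lt flags j hj]
      have hcnt : pvCount f (flags.getD j 0 :: flags.drop (j + 1)) = 0 := by
        simp only [pvCount]; rw [if_neg hne]
      omega
    · rw [List.drop_eq_nil_of_le (by omega)]
      simp [pvCount]
termination_by flags.length - j
decreasing_by omega

theorem pvOuter_go (flags : List Int) (i : Nat) (runs : List (Int × Int × Int)) :
    pvOuter flags flags.length i runs = runs ++ pvGo (flags.drop i) (i : Int) := by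
  unfold pvOuter
  split
  · rename_i h
    have hd : flags.drop i = flags.getD i 0 :: flags.drop (i + 1) :=
      drop_eq_cons_of_lt flags i h
    have hj : pvInner flags flags.length (flags.getD i 0) (i + 1)
        = i + 1 + pvCount (flags.getD i 0) (flags.drop (i + 1)) :=
      pvInner_count flags (flags.getD i 0) (i + 1)
    have ih := pvOuter_go flags (pvInner flags flags.length (flags.getD i 0) (i + 1))
      (runs ++ [(flags.getD i 0, (i : Int),
        ((pvInner flags flags.length (flags.getD i 0) (i + 1) : Nat) : Int) - 1)])
    rw [ih, hd, pvGo_cons]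
    rw [hj]
    rw [show flags.drop (i + 1 + pvCount (flags.getD i 0) (flags.drop (i + 1)))
        = (flags.drop (i + 1)).drop (pvCount (flags.getD i 0) (flags.drop (i + 1))) from by
      rw [List.drop_drop]]
    simp [List.append_assoc]
    constructor
    · ring
    · congr 1; ring
  · rename_i h
    rw [List.drop_eq_nil_of_le (by omega)]
    simp [pvGo]
termination_by flags.length - i
decreasing_by
  have := pvInner_ge flags flags.length (flags.getD i 0) (i + 1)
  omega

-- ===== VERDICT (by name: the statement is the Claim_ definition above) =====
theorem convert_flags_to_runs_spec : Claim_equal_convert_flags_to_runs := by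
  intro flags _
  unfold Spec_convert_flags_to_runs convert_flags_to_runs convert_flags_to_runs_alt
  have hB : pvOuter flags flags.length 0 [] = pvGo flags 0 := by
    simpa using pvOuter_go flags 0 []
  rw [hB]
  match flags with
  | [] => simp [pvGo]
  | f :: tl =>
    have h := keyA (f :: tl) tl [] [] f 0 (by simp) (by simp)
    have h0 : PySem.List.pyGetD (f :: tl) 0 0 = f := by simp [pysem]
    show pvFinish (f :: tl) ([], PySem.List.pyGetD (f :: tl) 0 0, 0) 1 = pvGo (f :: tl) 0
    rw [h0]
    simpa using h
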